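-- pv_equiv track=rewrite | github.com/AlphaTechnic/Algorithm_Contest | 2021-05-08_Kakao_Coding_Test/DEMOTEST.py | solution
-- ===== SOURCE A (Python) =====
-- from collections import Counter
--
-- def solution(points):
--     x_vals = []
--     y_vals = []
--     for x, y in points:
--         x_vals.append(x)
--         y_vals.append(y)
--
--     ans_x = Counter(x_vals).most_common()[-1][0]
--     ans_y = Counter(y_vals).most_common()[-1][0]
--     return [ans_x, ans_y]
-- ===== SOURCE B (Python) =====
-- def solution(points):
--     cx = {}
--     cy = {}
--     for x, y in points:
--         cx[x] = cx.get(x, 0) + 1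
--         cy[y] = cy.get(y, 0) + 1
--
--     def least(cnt):
--         best = None
--         for k, c in cnt.items():
--             if best is None or c <= best[1]:
--                 best = (k, c)
--         return best[0]
--
--     return [least(cx), least(cy)]
-- ===== Notes on version B (the rewrite author's own statement) =====
-- stated objective: faster
-- what changed: B builds both coordinate counters in one pass over points (no intermediate x/y lists) and finds the least-frequent key by a linear <=-scan over the dict items (last min-count key wins, matching most_common's stable sort tie-break) instead of sorting the counter items.
-- outside the precondition, e.g. on solution([]): A raises IndexError, B raises TypeError
import Mathlib
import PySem

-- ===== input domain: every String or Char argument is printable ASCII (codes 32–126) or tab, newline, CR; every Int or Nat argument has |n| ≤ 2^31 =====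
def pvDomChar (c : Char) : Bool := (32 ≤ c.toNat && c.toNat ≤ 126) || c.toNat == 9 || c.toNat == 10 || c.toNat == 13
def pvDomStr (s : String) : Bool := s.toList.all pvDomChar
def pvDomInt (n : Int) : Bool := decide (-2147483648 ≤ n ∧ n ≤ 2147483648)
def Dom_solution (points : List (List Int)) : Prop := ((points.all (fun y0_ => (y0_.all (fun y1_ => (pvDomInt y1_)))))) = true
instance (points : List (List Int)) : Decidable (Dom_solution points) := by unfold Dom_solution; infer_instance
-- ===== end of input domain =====

-- B replaces A's sort-based most_common()[-1] by a one-pass counter build and a linear <=-min-scan (O(n) scan instead of the sort).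

-- ===== PORT A =====
-- for x, y in points: x_vals.append(x); y_vals.append(y)
-- Counter(xs).most_common() = sorted(Counter(xs).items(), key=itemgetter(1), reverse=True); [-1][0] via pyGetD (exact under Pre_).
def solution (points : List (List Int)) : List Int :=
  let vals := points.foldl
    (fun (a : List Int × List Int) p =>
      (a.1 ++ [PySem.List.pyGetD p 0 0], a.2 ++ [PySem.List.pyGetD p 1 0])) ([], [])
  let ansX := (PySem.List.pyGetD
      (PySem.List.sorted (PySem.Dict.counter vals.1).items (fun kv => kv.2) true) (-1) (0, 0)).1
  let ansY := (PySem.List.pyGetD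
      (PySem.List.sorted (PySem.Dict.counter vals.2).items (fun kv => kv.2) true) (-1) (0, 0)).1
  [ansX, ansY]

-- ===== PORT B =====
-- least(cnt): running best over cnt.items(), updated on c <= best count; 'best[0]' with best=None raises, so 0 is unreachable under Pre_.
def leastKey (d : PySem.Dict Int Int) : Int :=
  match d.items.foldl
      (fun (best : Option (Int × Int)) kv =>
        match best with
        | none => some kv
        | some b => if kv.2 ≤ b.2 then some kv else some b) none with
  | some b => b.1
  | none => 0

def solution_alt (points : List (List Int)) : List Int :=
  let c := points.foldl
    (fun (a : PySem.Dict Int Int × PySem.Dict Int Int) p =>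
      (a.1.insert (PySem.List.pyGetD p 0 0) (a.1.getD (PySem.List.pyGetD p 0 0) 0 + 1),
       a.2.insert (PySem.List.pyGetD p 1 0) (a.2.getD (PySem.List.pyGetD p 1 0) 0 + 1)))
    (PySem.Dict.empty, PySem.Dict.empty)
  [leastKey c.1, leastKey c.2]

-- ===== PRECONDITION & SPEC =====
-- Exactly where Python A returns: nonempty points (most_common()[-1] raises IndexError on empty input) and every
-- point of length 2 ('for x, y in points' raises ValueError otherwise).
def Pre_solution (points : List (List Int)) : Prop :=
  points ≠ [] ∧ ∀ p ∈ points, p.length = 2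
instance (points : List (List Int)) : Decidable (Pre_solution points) := by unfold Pre_solution; infer_instance

def pvWitness_solution : List (List Int) := [[1, 2], [3, 4], [1, 5]]

def Spec_solution (points : List (List Int)) (out : List Int) : Prop := out = solution_alt points
instance (points : List (List Int)) (out : List Int) : Decidable (Spec_solution points out) := by unfold Spec_solution; infer_instance

-- ===== CLAIM (what is proved, stated in full; the proofs are below) =====
def Claim_equal_solution : Prop := ∀ (points : List (List Int)), Dom_solution points → Pre_solution points → Spec_solution points (solution points)

-- ===== LEMMAS AND PROOFS =====

-- insertBy never produces the empty list
lemma insertBy_ne_nil {α : Type} (f : α → α → Bool) (x : α) (l : List α) :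
    PySem.List.insertBy f x l ≠ [] := by
  cases l with
  | nil => simp [PySem.List.insertBy]
  | cons y ys =>
    simp only [PySem.List.insertBy]
    split <;> simp

-- the last element after insertion: x if it beats everyone, else the old last
lemma getLast?_insertBy {α : Type} (f : α → α → Bool) (x : α) (l : List α) :
    (PySem.List.insertBy f x l).getLast? =
      if l.all (fun y => !(f x y)) then some x else l.getLast? := by
  induction l with
  | nil => simp [PySem.List.insertBy]
  | cons y ys ih =>
    simp only [PySem.List.insertBy]
    by_cases h : f x y
    · simp [h]
    · rw [if_neg h]
      have hne := insertBy_ne_nil f x ys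
      rw [List.getLast?_cons (a := y)]
      simp only [List.all_cons, h, Bool.not_false, Bool.true_and]
      by_cases hall : ys.all (fun y => !f x y)
      · rw [if_pos hall] at ih ⊢
        simp [ih]
      · rw [if_neg hall] at ih ⊢
        cases hys : ys.getLast? with
        | none =>
          exact absurd (by simp [List.getLast?_eq_none_iff.mp hys]) hall
        | some z =>
          rw [ih, hys, List.getLast?_cons, hys]

-- main invariant: folding insertions keeps the last element equal to the running <=-min-scan
lemma foldl_insertBy_scan (l : List (Int × Int)) :
    ∀ (acc : List (Int × Int)) (b : Int × Int),
    acc.getLast? = some b → (∀ y ∈ acc, b.2 ≤ y.2) →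
    (l.foldl (fun a x => PySem.List.insertBy (fun a b => decide (b.2 < a.2)) x a) acc).getLast?
      = some (l.foldl (fun a kv => if kv.2 ≤ a.2 then kv else a) b) := by
  induction l with
  | nil => intro acc b hb _; simpa using hb
  | cons x t ih =>
    intro acc b hb hmin
    have hbmem : b ∈ acc := List.mem_of_getLast? hb
    simp only [List.foldl_cons]
    by_cases hall : acc.all (fun y => !(decide (y.2 < x.2)))
    · -- x goes last: x.2 ≤ every key in acc, in particular x.2 ≤ b.2
      have hx : ∀ y ∈ acc, x.2 ≤ y.2 := by
        intro y hy
        have := List.all_eq_true.mp hall y hy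
        simp at this; omega
      have hxb : x.2 ≤ b.2 := hx b hbmem
      have hlast : (PySem.List.insertBy (fun a b => decide (b.2 < a.2)) x acc).getLast? = some x := by
        rw [getLast?_insertBy, if_pos hall]
      rw [ih _ x hlast (by
        intro y hy
        rcases (PySem.List.mem_insertBy _ x y acc).mp hy with rfl | hy
        · exact le_refl _
        · exact hx y hy)]
      rw [if_pos hxb]
    · -- some element of acc has a strictly smaller key than x: b stays last and b.2 < x.2
      have hex : ∃ y ∈ acc, y.2 < x.2 := by
        by_contra hno
        push Not at hno
        exact hall (List.all_eq_true.mpr (by intro y hy; simpa using hno y hy))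
      obtain ⟨y, hy, hylt⟩ := hex
      have hbx : ¬ (x.2 ≤ b.2) := by have := hmin y hy; omega
      have hlast : (PySem.List.insertBy (fun a b => decide (b.2 < a.2)) x acc).getLast? = some b := by
        rw [getLast?_insertBy, if_neg hall]; exact hb
      rw [ih _ b hlast (by
        intro z hz
        rcases (PySem.List.mem_insertBy _ x z acc).mp hz with rfl | hz
        · have := hmin y hy; omega
        · exact hmin z hz)]
      rw [if_neg hbx]

-- the Option-valued scan of B equals the plain scan once seeded
lemma optScan_eq (t : List (Int × Int)) :
    ∀ (b : Int × Int),
    t.foldl (fun (best : Option (Int × Int)) kv =>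
        match best with
        | none => some kv
        | some b => if kv.2 ≤ b.2 then some kv else some b) (some b)
      = some (t.foldl (fun a kv => if kv.2 ≤ a.2 then kv else a) b) := by
  induction t with
  | nil => intro b; rfl
  | cons x t ih =>
    intro b
    simp only [List.foldl_cons]
    by_cases h : x.2 ≤ b.2 <;> simp [h, ih]

-- last of the descending stable sort = B's <=-min-scan
lemma getLast?_sorted_eq_scan (l : List (Int × Int)) (h : l ≠ []) :
    (PySem.List.sorted l (fun kv => kv.2) true).getLast?
      = l.foldl (fun (best : Option (Int × Int)) kv =>
          match best with
          | none => some kv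
          | some b => if kv.2 ≤ b.2 then some kv else some b) none := by
  cases l with
  | nil => exact absurd rfl h
  | cons p t =>
    rw [PySem.List.sorted_rev_eq_foldl_insertBy]
    simp only [List.foldl_cons]
    have h1 : (PySem.List.insertBy (fun a b => decide ((fun kv : Int × Int => kv.2) b < (fun kv : Int × Int => kv.2) a)) p []) = [p] := rfl
    rw [h1]
    rw [foldl_insertBy_scan t [p] p (by simp) (by simp)]
    rw [optScan_eq]

-- counter of a nonempty list has nonempty items
lemma items_counter_ne_nil (xs : List Int) (h : xs ≠ []) :
    (PySem.Dict.counter xs).items ≠ [] := by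
  cases xs with
  | nil => exact absurd rfl h
  | cons a t =>
    intro hc
    have : a ∈ PySem.Set.ofList (a :: t) := (PySem.Set.mem_ofList _ _).mpr (by simp)
    have := List.mem_map_of_mem (f := fun k => (k, ((a :: t).count k : Int))) this
    rw [← PySem.Dict.items_counter] at this
    simp [hc] at this

-- core: A's sort-then-take-last equals B's leastKey, per coordinate
lemma least_eq_last (xs : List Int) (h : xs ≠ []) :
    (PySem.List.pyGetD
      (PySem.List.sorted (PySem.Dict.counter xs).items (fun kv => kv.2) true) (-1) (0, 0)).1
      = leastKey (PySem.Dict.counter xs) := by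
  have hitems := items_counter_ne_nil xs h
  have hs : PySem.List.sorted (PySem.Dict.counter xs).items (fun kv => kv.2) true ≠ [] := by
    intro hc
    exact hitems ((PySem.List.sorted_eq_nil_iff _ _ _).mp hc)
  rw [PySem.List.pyGetD_neg_one _ _ hs]
  unfold leastKey
  rw [← getLast?_sorted_eq_scan _ hitems]
  rw [List.getLast?_eq_some_getLast hs]

-- ===== VERDICT (by name: the statement is the Claim_ definition above) =====
theorem solution_spec : Claim_equal_solution := by
  intro points _ hpre
  unfold Spec_solution
  simp only [solution, solution_alt]
  rw [PySem.List.foldl_prod_mk (fun l (p : List Int) => l ++ [PySem.List.pyGetD p 0 0])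
      (fun l p => l ++ [PySem.List.pyGetD p 1 0]) points [] []]
  rw [PySem.List.foldl_prod_mk
      (fun (d : PySem.Dict Int Int) (p : List Int) =>
        d.insert (PySem.List.pyGetD p 0 0) (d.getD (PySem.List.pyGetD p 0 0) 0 + 1))
      (fun (d : PySem.Dict Int Int) (p : List Int) =>
        d.insert (PySem.List.pyGetD p 1 0) (d.getD (PySem.List.pyGetD p 1 0) 0 + 1))
      points PySem.Dict.empty PySem.Dict.empty]
  simp only [PySem.List.foldl_append_singleton_eq_map, List.nil_append]
  have hmap : ∀ (f : List Int → Int),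
      points.foldl (fun d p => d.insert (f p) (d.getD (f p) 0 + 1)) PySem.Dict.empty
        = PySem.Dict.counter (points.map f) := by
    intro f
    rw [← PySem.Dict.foldl_insert_getD_add_one_eq_counter, List.foldl_map]
  rw [hmap (fun p => PySem.List.pyGetD p 0 0), hmap (fun p => PySem.List.pyGetD p 1 0)]
  have hne : points ≠ [] := hpre.1
  rw [least_eq_last _ (by simpa using hne), least_eq_last _ (by simpa using hne)]
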